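-- pv_equiv track=rewrite | github.com/aghabidareh/MiniPython | Ordered Fractions.py | find_fraction_left_of_three_seventh
-- ===== SOURCE A (Python) =====
-- def find_fraction_left_of_three_seventh(limit):
--     target_numerator = 3
--     target_denominator = 7
--
--     best_numerator = 0
--     best_denominator = 1
--
--     for d in range(2, limit + 1):
--         n = (3 * d - 1) // 7
--         if n * target_denominator < target_numerator * d:
--             if n * best_denominator > best_numerator * d:
--                 best_numerator = n
--                 best_denominator = d
--
--     return best_numerator
-- ===== SOURCE B (Python) =====
-- def find_fraction_left_of_three_seventh(limit):
--     # Closed form: the best fraction below 3/7 has the largest denominator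
--     # D <= limit with D % 7 == 5 (Farey neighbour), numerator (3*D - 1) // 7.
--     if limit < 3:
--         return 0
--     if limit < 5:
--         return 1
--     D = limit - (limit - 5) % 7
--     return (3 * D - 1) // 7
-- ===== Notes on version B (the rewrite author's own statement) =====
-- stated objective: faster
-- what changed: Replaces the O(limit) scan over all denominators with an O(1) closed form: the best fraction below 3/7 is reached at the largest denominator D <= limit with D % 7 == 5 (Farey neighbour), numerator (3*D-1)//7, with literal values for limit < 5.
import Mathlib
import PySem

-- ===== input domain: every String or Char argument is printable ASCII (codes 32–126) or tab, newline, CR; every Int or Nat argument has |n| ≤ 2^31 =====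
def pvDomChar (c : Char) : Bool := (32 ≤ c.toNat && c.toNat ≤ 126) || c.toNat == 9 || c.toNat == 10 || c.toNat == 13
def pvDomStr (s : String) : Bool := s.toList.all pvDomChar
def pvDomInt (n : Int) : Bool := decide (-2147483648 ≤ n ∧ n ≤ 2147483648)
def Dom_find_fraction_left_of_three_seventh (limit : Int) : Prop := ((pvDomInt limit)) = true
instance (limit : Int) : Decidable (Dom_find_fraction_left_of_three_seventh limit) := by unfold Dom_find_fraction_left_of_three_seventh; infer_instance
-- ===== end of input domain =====

-- B replaces A's O(limit) scan with an O(1) closed form (Farey neighbour of 3/7): faster.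


-- ===== PORT A =====
-- loop body of A's 'for d in range(2, limit+1)', state = (best_numerator, best_denominator)
def ffLoopBody (st : Int × Int) (d : Int) : Int × Int :=
  let n := PySem.Int.floordiv (3 * d - 1) 7
  if n * 7 < 3 * d then
    if n * st.2 > st.1 * d then (n, d) else st
  else st

def find_fraction_left_of_three_seventh (limit : Int) : Int :=
  ((PySem.List.pyRange 2 (limit + 1) 1).foldl ffLoopBody (0, 1)).1

-- ===== PORT B =====
def find_fraction_left_of_three_seventh_alt (limit : Int) : Int :=
  if limit < 3 then 0
  else if limit < 5 then 1
  else
    let D := limit - PySem.Int.mod (limit - 5) 7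
    PySem.Int.floordiv (3 * D - 1) 7

-- ===== PRECONDITION & SPEC =====
def Spec_find_fraction_left_of_three_seventh (limit : Int) (out : Int) : Prop := out = find_fraction_left_of_three_seventh_alt limit
instance (limit : Int) (out : Int) : Decidable (Spec_find_fraction_left_of_three_seventh limit out) := by unfold Spec_find_fraction_left_of_three_seventh; infer_instance

-- ===== CLAIM (what is proved, stated in full; the proofs are below) =====
def Claim_equal_find_fraction_left_of_three_seventh : Prop := ∀ (limit : Int), Dom_find_fraction_left_of_three_seventh limit → Spec_find_fraction_left_of_three_seventh limit (find_fraction_left_of_three_seventh limit)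

-- ===== LEMMAS AND PROOFS =====

-- closed form for A's loop state after processing d = 2 .. m
def ffStateAt (m : Int) : Int × Int :=
  if m < 3 then (0, 1)
  else if m < 5 then (1, 3)
  else
    let D := m - (m - 5) % 7
    ((3 * D - 1) / 7, D)

lemma ffStep (m : Int) (hm : 11 ≤ m) :
    ffLoopBody (ffStateAt m) (m + 1) = ffStateAt (m + 1) := by
  have h5 : ¬ m < 3 := by omega
  have h5' : ¬ m < 5 := by omega
  have h5'' : ¬ m + 1 < 3 := by omega
  have h5''' : ¬ m + 1 < 5 := by omega
  simp only [ffStateAt, ffLoopBody, if_neg h5, if_neg h5', if_neg h5'', if_neg h5''']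
  rw [PySem.Int.floordiv_eq_ediv_of_pos (by norm_num)]
  set k : Int := (m - 5) % 7 with hk
  set D : Int := m - k with hD
  set N : Int := (3 * D - 1) / 7 with hN
  set n : Int := (3 * (m + 1) - 1) / 7 with hn
  set s : Int := (3 * (m + 1) - 1) % 7 with hs
  have hns : 7 * n + s = 3 * (m + 1) - 1 ∧ 0 ≤ s ∧ s < 7 := by omega
  have h7N : 7 * N = 3 * D - 1 := by omega
  have hcond : n * 7 < 3 * (m + 1) := by omega
  by_cases hc : (m - 4) % 7 = 0
  · -- d = m+1 ≡ 5 (mod 7): new best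
    have hs0 : s = 0 := by omega
    have hkk : k = 6 := by omega
    have key : 7 * (n * D) - 7 * (N * (m + 1)) = (m + 1) - D := by
      have e1 : 7 * n = 3 * (m + 1) - 1 := by omega
      linear_combination D * e1 - (m + 1) * h7N
    have hgt : n * D > N * (m + 1) := by
      have : (m + 1) - D = 7 := by omega
      linarith
    simp only [if_pos hcond, if_pos hgt]
    have hD' : m + 1 - (m + 1 - 5) % 7 = m + 1 := by omega
    refine Prod.ext ?_ ?_ <;> simp only [hD'] <;> omega
  · -- d = m+1 not ≡ 5 (mod 7): state unchanged
    have hs1 : 1 ≤ s := by omega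
    have hk6 : k < 6 := by omega
    have hD12 : 12 ≤ D := by omega
    have key : 7 * (N * (m + 1)) - 7 * (n * D) = D * (1 + s) - (m + 1) := by
      have e1 : 7 * n = 3 * (m + 1) - 1 - s := by omega
      linear_combination (m + 1) * h7N - D * e1
    have hge : ¬ n * D > N * (m + 1) := by
      have h2D : D * (1 + s) ≥ 2 * D := by nlinarith
      have : 2 * D ≥ m + 1 := by omega
      linarith
    simp only [if_pos hcond, if_neg hge]
    have hD' : m + 1 - (m + 1 - 5) % 7 = D := by omega
    refine Prod.ext ?_ ?_ <;> simp only [hD'] <;> omega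

lemma ffInv (m : Int) (hm : 11 ≤ m) :
    (PySem.List.pyRange 2 (m + 1) 1).foldl ffLoopBody (0, 1) = ffStateAt m := by
  induction m, hm using Int.le_induction with
  | base => decide
  | succ n hn ih =>
      have h : (2 : Int) ≤ n + 1 := by omega
      rw [show n + 1 + 1 = (n + 1) + 1 from rfl, PySem.List.pyRange_one_succ_right (by omega : (2:Int) ≤ n + 1),
        List.foldl_append]
      simp only [List.foldl_cons, List.foldl_nil]
      rw [ih]
      exact ffStep n hn

-- ===== VERDICT (by name: the statement is the Claim_ definition above) =====
theorem find_fraction_left_of_three_seventh_spec : Claim_equal_find_fraction_left_of_three_seventh := by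
  intro limit _
  unfold Spec_find_fraction_left_of_three_seventh
  by_cases h11 : 11 ≤ limit
  · unfold find_fraction_left_of_three_seventh find_fraction_left_of_three_seventh_alt
    rw [ffInv limit h11]
    rw [PySem.Int.floordiv_eq_ediv_of_pos (by norm_num), PySem.Int.mod_eq_emod_of_pos (by norm_num)]
    simp only [ffStateAt, if_neg (by omega : ¬ limit < 3), if_neg (by omega : ¬ limit < 5)]
  · by_cases h2 : 2 ≤ limit
    · interval_cases limit <;> decide
    · unfold find_fraction_left_of_three_seventh find_fraction_left_of_three_seventh_alt
      rw [PySem.List.pyRange_one_eq_nil (by omega : limit + 1 ≤ 2)]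
      simp only [List.foldl_nil, if_pos (by omega : limit < 3)]
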